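-- pv_equiv track=rewrite | github.com/ibo-123/CSEC-CPD | C_Traffic_Light.py | solve
-- ===== SOURCE A (Python) =====
-- def solve(n , s , arr):
--         arr = arr + arr
--         ind = 0
--         ans = 0
--         coun = 0
--         start = False
--         while ind < n*2:
--                 if not start and arr[ind] == s:
--                         start = True
--                 if arr[ind] == "g" and start:
--                         ans = max(ans , coun)
--                         coun = 0
--                         start = False
--                 else:
--                         if start:
--                                 coun+=1
--                 ind+=1
--         return max(ans , coun)
-- ===== SOURCE B (Python) =====
-- def solve(n, s, arr):
--     d = (arr + arr)[:max(2 * n, 0)]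
--     best = 0
--     run = []
--     for c in d:
--         if c == "g":
--             if s in run:
--                 best = max(best, len(run) - run.index(s))
--             run = []
--         else:
--             run.append(c)
--     if s in run:
--         best = max(best, len(run) - run.index(s))
--     return best
-- ===== Notes on version B (the rewrite author's own statement) =====
-- stated objective: alternative
-- what changed: A runs a three-variable state machine (ans/coun/start flag) over indices of the doubled list; B slices the first 2n elements of the doubled list, cuts it into 'g'-delimited runs and takes the max over runs of len(run) - first index of s.
import Mathlib
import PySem

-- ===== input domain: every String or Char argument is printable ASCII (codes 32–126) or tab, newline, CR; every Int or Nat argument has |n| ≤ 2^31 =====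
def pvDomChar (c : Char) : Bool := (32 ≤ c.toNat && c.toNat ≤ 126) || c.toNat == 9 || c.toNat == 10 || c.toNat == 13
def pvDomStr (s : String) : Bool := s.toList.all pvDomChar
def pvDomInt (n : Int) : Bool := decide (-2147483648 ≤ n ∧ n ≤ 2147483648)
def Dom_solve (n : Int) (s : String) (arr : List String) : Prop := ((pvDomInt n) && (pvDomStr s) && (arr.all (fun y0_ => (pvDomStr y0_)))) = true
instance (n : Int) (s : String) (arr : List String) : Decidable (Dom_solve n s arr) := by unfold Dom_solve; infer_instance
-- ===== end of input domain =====

-- B is an alternative decomposition: instead of A's ans/coun/start state machine over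
-- indices, it slices the first 2n elements of the doubled list and splits them into
-- 'g'-delimited runs, maxing len(run) - first index of s over runs.

-- ===== PORT A =====
-- A's loop body: given state (ans, coun, start) and the element arr[ind]
def stepA (s : String) (st : Int × Int × Bool) (x : String) : Int × Int × Bool :=
  let start := if (!st.2.2) && (x == s) then true else st.2.2
  if (x == "g") && start then (max st.1 st.2.1, 0, false)
  else (st.1, if start then st.2.1 + 1 else st.2.1, start)

def solve (n : Int) (s : String) (arr : List String) : Int :=
  let a2 := arr ++ arr
  let st := (PySem.List.pyRange 0 (n * 2) 1).foldl
      (fun st ind => stepA s st (PySem.List.pyGetD a2 ind "")) (0, 0, false)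
  max st.1 st.2.1

-- ===== PORT B =====
-- B's loop body: given state (best, run) and the next element c
def stepB (s : String) (st : Int × List String) (c : String) : Int × List String :=
  if c == "g" then
    (match PySem.List.index? st.2 s with
     | some i => max st.1 ((st.2.length : Int) - (i : Int))
     | none => st.1, [])
  else (st.1, st.2 ++ [c])

def solve_alt (n : Int) (s : String) (arr : List String) : Int :=
  let d := PySem.List.slice (arr ++ arr) none (some (max (2 * n) 0))
  let fin := d.foldl (stepB s) (0, [])
  match PySem.List.index? fin.2 s with
  | some i => max fin.1 ((fin.2.length : Int) - (i : Int))
  | none => fin.1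

-- ===== PRECONDITION & SPEC =====
-- A indexes the doubled list at 0..2n-1, so it raises IndexError iff n > len(arr); Pre_ excludes exactly that.
def Pre_solve (n : Int) (s : String) (arr : List String) : Prop := n ≤ (arr.length : Int)
instance (n : Int) (s : String) (arr : List String) : Decidable (Pre_solve n s arr) := by unfold Pre_solve; infer_instance
def pvWitness_solve : Int × String × List String := (2, "r", ["r", "g"])

def Spec_solve (n : Int) (s : String) (arr : List String) (out : Int) : Prop := out = solve_alt n s arr
instance (n : Int) (s : String) (arr : List String) (out : Int) : Decidable (Spec_solve n s arr out) := by unfold Spec_solve; infer_instance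

-- ===== CLAIM (what is proved, stated in full; the proofs are below) =====
def Claim_equal_solve : Prop := ∀ (n : Int) (s : String) (arr : List String), Dom_solve n s arr → Pre_solve n s arr → Spec_solve n s arr (solve n s arr)

-- ===== LEMMAS AND PROOFS =====

def counOf (s : String) (run : List String) : Int :=
  match PySem.List.index? run s with
  | some i => (run.length : Int) - (i : Int)
  | none => 0

def finB (s : String) (st : Int × List String) : Int :=
  match PySem.List.index? st.2 s with
  | some i => max st.1 ((st.2.length : Int) - (i : Int))
  | none => st.1

lemma fold_inv (s : String) (d : List String) (best : Int) (run : List String)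
    (hg : "g" ∉ run) (h0 : 0 ≤ best) :
    (let a := d.foldl (stepA s) (best, counOf s run, run.contains s); max a.1 a.2.1)
      = finB s (d.foldl (stepB s) (best, run)) := by
  induction d generalizing best run with
  | nil =>
    simp only [List.foldl_nil, finB]
    cases hidx : PySem.List.index? run s with
    | none =>
      have hc0 : counOf s run = 0 := by simp only [counOf]; rw [hidx]
      rw [hc0]; show max best 0 = best; omega
    | some i =>
      have hc1 : counOf s run = (run.length : Int) - i := by simp only [counOf]; rw [hidx]
      rw [hc1]
  | cons c d ih =>
    simp only [List.foldl_cons]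
    have e1 : counOf s [] = 0 := rfl
    have e2 : ([] : List String).contains s = false := rfl
    by_cases hc : c = "g"
    · subst hc
      by_cases hm : s ∈ run
      · have hsg : s ≠ "g" := fun h => hg (h ▸ hm)
        obtain ⟨i, hi⟩ := Option.isSome_iff_exists.mp ((PySem.List.index?_isSome_iff run s).mpr hm)
        have hcoun : counOf s run = (run.length : Int) - i := by simp only [counOf]; rw [hi]
        have hA : stepA s (best, counOf s run, run.contains s) "g"
            = (max best (counOf s run), 0, false) := by
          simp [stepA, hm]
        have hB : stepB s (best, run) "g" = (max best ((run.length : Int) - i), []) := by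
          simp only [stepB, beq_self_eq_true, if_true]; rw [hi]
        rw [hA, hB, ← hcoun]
        have := ih (max best (counOf s run)) [] (by simp) (le_trans h0 (le_max_left _ _))
        rw [e1, e2] at this
        exact this
      · have hidx : PySem.List.index? run s = none := (PySem.List.index?_eq_none_iff run s).mpr hm
        have hcoun : counOf s run = 0 := by simp only [counOf]; rw [hidx]
        have hA : stepA s (best, counOf s run, run.contains s) "g"
            = (best, 0, false) := by
          by_cases hs : s = "g"
          · subst hs; simp [stepA, hm, hcoun]; omega
          · simp [stepA, hm, hcoun, Ne.symm hs]
        have hB : stepB s (best, run) "g" = (best, []) := by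
          simp only [stepB, beq_self_eq_true, if_true]; rw [hidx]
        rw [hA, hB]
        have := ih best [] (by simp) h0
        rw [e1, e2] at this
        exact this
    · have hcg : (c == "g") = false := by simp [hc]
      have hB : stepB s (best, run) c = (best, run ++ [c]) := by simp [stepB, hcg]
      have hg' : "g" ∉ run ++ [c] := by
        simp only [List.mem_append, List.mem_singleton]
        exact fun h => h.elim hg (fun h2 => hc h2.symm)
      by_cases hm : s ∈ run
      · obtain ⟨i, hi⟩ := Option.isSome_iff_exists.mp ((PySem.List.index?_isSome_iff run s).mpr hm)
        have hi' : PySem.List.index? (run ++ [c]) s = some i :=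
          (PySem.List.index?_append_of_mem [c] hm).trans hi
        have hlt : i < run.length := by
          rcases PySem.List.getElem_of_index?_eq_some hi with ⟨hk, _, _⟩; exact hk
        have hcoun : counOf s run = (run.length : Int) - i := by simp only [counOf]; rw [hi]
        have hcoun' : counOf s (run ++ [c]) = counOf s run + 1 := by
          simp only [counOf]; rw [hi, hi']; simp; omega
        have hA : stepA s (best, counOf s run, run.contains s) c
            = (best, counOf s (run ++ [c]), (run ++ [c]).contains s) := by
          simp [stepA, hm, hcg, hcoun']
        rw [hA, hB]
        exact ih best (run ++ [c]) hg' h0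
      · have hidx : PySem.List.index? run s = none := (PySem.List.index?_eq_none_iff run s).mpr hm
        have hcoun : counOf s run = 0 := by simp only [counOf]; rw [hidx]
        by_cases hcs : c = s
        · subst hcs
          have hi' : PySem.List.index? (run ++ [c]) c = some run.length :=
            PySem.List.index?_append_singleton_self run c hm
          have hcoun' : counOf c (run ++ [c]) = 1 := by
            simp only [counOf]; rw [hi']; simp
          have hA : stepA c (best, counOf c run, run.contains c) c
              = (best, counOf c (run ++ [c]), (run ++ [c]).contains c) := by
            simp [stepA, hm, hcoun, hcoun', hcg]
          rw [hA, hB]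
          exact ih best (run ++ [c]) hg' h0
        · have hnm : s ∉ run ++ [c] := by
            simp only [List.mem_append, List.mem_singleton]
            exact fun h => h.elim hm (fun h2 => hcs h2.symm)
          have hidx' : PySem.List.index? (run ++ [c]) s = none :=
            (PySem.List.index?_eq_none_iff (run ++ [c]) s).mpr hnm
          have hcoun' : counOf s (run ++ [c]) = 0 := by
            simp only [counOf]; rw [hidx']
          have hA : stepA s (best, counOf s run, run.contains s) c
              = (best, counOf s (run ++ [c]), (run ++ [c]).contains s) := by
            simp [stepA, hm, hcoun, hcoun', hcg, hnm, fun h : c = s => hcs h]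
          rw [hA, hB]
          exact ih best (run ++ [c]) hg' h0

-- ===== VERDICT (by name: the statement is the Claim_ definition above) =====
theorem solve_spec : Claim_equal_solve := by
  intro n s arr _ hpre
  unfold Spec_solve
  have hpre' : n ≤ (arr.length : Int) := hpre
  simp only [solve, solve_alt]
  by_cases hn : n * 2 ≤ 0
  · rw [PySem.List.pyRange_one_eq_nil hn]
    have hmax : max (2 * n) 0 = 0 := by omega
    rw [hmax, PySem.List.slice_to _ (le_refl 0)]
    rfl
  · set a2 := arr ++ arr with ha2
    have hlen : (a2.length : Int) = 2 * (arr.length : Int) := by simp [ha2]; ring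
    have h2n : 2 * n ≤ (a2.length : Int) := by omega
    have hd : PySem.List.slice a2 none (some (max (2 * n) 0)) = a2.take (2 * n).toNat := by
      rw [max_eq_left (by omega), PySem.List.slice_to _ (by omega)]
    set d := a2.take (2 * n).toNat with hdd
    have hdlen : (d.length : Int) = n * 2 := by
      simp [hdd]; omega
    have hstep : ∀ (acc : Int × Int × Bool), ∀ ind ∈ PySem.List.pyRange 0 (n * 2) 1,
        stepA s acc (PySem.List.pyGetD a2 ind "") = stepA s acc (PySem.List.pyGetD d ind "") := by
      intro acc ind hmem
      rw [PySem.List.mem_pyRange_one] at hmem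
      have hlt : ind.toNat < d.length := by omega
      rw [PySem.List.pyGetD_eq_getElem a2 "" hmem.1 (by omega),
          PySem.List.pyGetD_eq_getElem d "" hmem.1 (by omega)]
      congr 1
      simp [hdd]
    rw [PySem.List.foldl_congr_mem _ _ _ _ hstep, hd]
    rw [show n * 2 = (d.length : Int) from hdlen.symm,
        PySem.List.foldl_pyRange_zero_pyGetD' d "" (stepA s) (0, 0, false)]
    exact fold_inv s d 0 [] (by simp) (le_refl 0)
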